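-- pv_equiv track=rewrite | github.com/miliar/Code_Jam_Webscraper | solutions_python/Problem_155/1778.py | opera
-- ===== SOURCE A (Python) =====
-- def opera(length, array, index):
--   level = 0
--   counter = 0
--   audience = 0
--   for persons in array:
--     if level == 0:
--       audience += persons
--     else:
--       if audience >= level:
--         audience += persons
--       else:
--         friends = level - audience
--         audience += persons + friends
--         counter += friends
--     level += 1
--   return counter
-- ===== SOURCE B (Python) =====
-- def opera(length, array, index):
--     # Closed form: the number of added friends equals the largest prefix deficit
--     # max(0, max_i (i - (array[0] + ... + array[i-1]))); computed in two stages: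
--     # prefix sums first, then a max over deficits. No audience simulation.
--     prefixes = []
--     s = 0
--     for p in array:
--         prefixes.append(s)
--         s += p
--     best = 0
--     for i, t in enumerate(prefixes):
--         best = max(best, i - t)
--     return best
-- ===== Notes on version B (the rewrite author's own statement) =====
-- stated objective: simpler
-- what changed: B replaces A's audience/friends simulation (conditional top-ups and a running counter) with the closed form counter = max(0, max_i (i - prefix_sum_i)): one pass building prefix sums, then a max over the prefix deficits.
import Mathlib
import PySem

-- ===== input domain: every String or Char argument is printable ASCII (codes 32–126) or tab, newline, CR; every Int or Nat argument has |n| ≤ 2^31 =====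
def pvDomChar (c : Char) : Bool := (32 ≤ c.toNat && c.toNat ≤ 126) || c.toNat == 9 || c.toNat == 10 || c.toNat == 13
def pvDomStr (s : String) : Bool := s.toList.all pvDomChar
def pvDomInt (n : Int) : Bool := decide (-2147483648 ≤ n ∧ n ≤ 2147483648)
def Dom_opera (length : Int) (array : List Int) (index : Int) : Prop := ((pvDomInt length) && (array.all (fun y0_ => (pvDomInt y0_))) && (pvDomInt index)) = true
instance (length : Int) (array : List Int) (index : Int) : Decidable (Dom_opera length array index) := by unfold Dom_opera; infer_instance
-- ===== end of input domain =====

-- B replaces A's audience/friends simulation with the closed form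
-- counter = max(0, max_i (i - prefix_sum_i)): prefix sums, then a max over deficits. Objective: simpler.

-- ===== PORT A =====
-- state = (level, counter, audience), exactly A's loop variables
def opera (length : Int) (array : List Int) (index : Int) : Int :=
  let s := array.foldl
    (fun (st : Int × Int × Int) persons =>
      let level := st.1; let counter := st.2.1; let audience := st.2.2
      if level = 0 then
        (level + 1, counter, audience + persons)
      else if audience ≥ level then
        (level + 1, counter, audience + persons)
      else
        (level + 1, counter + (level - audience), audience + persons + (level - audience)))
    (0, 0, 0)
  s.2.1

-- ===== PORT B =====
-- Source B, pass 1: state = (s, prefixes), append the current sum then add p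
-- Source B, pass 2: best = max(best, i - t) over enumerate(prefixes)
def opera_alt (length : Int) (array : List Int) (index : Int) : Int :=
  let st := array.foldl
    (fun (st : Int × List Int) p => (st.1 + p, st.2 ++ [st.1])) (0, [])
  (PySem.List.enumerate st.2 0).foldl (fun best it => max best (it.1 - it.2)) 0

-- ===== PRECONDITION & SPEC =====
def Spec_opera (length : Int) (array : List Int) (index : Int) (out : Int) : Prop := out = opera_alt length array index
instance (length : Int) (array : List Int) (index : Int) (out : Int) : Decidable (Spec_opera length array index out) := by unfold Spec_opera; infer_instance

-- ===== CLAIM (what is proved, stated in full; the proofs are below) =====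
def Claim_equal_opera : Prop := ∀ (length : Int) (array : List Int) (index : Int), Dom_opera length array index → Spec_opera length array index (opera length array index)

-- ===== LEMMAS AND PROOFS =====

-- reference value: max over the remaining deficits (i+k) - (s+T_k), and 0
def bestSpec : List Int → Int → Int → Int
  | [], _, _ => 0
  | p :: rest, i, s => max (i - s) (bestSpec rest (i + 1) (s + p))

theorem bestSpec_nonneg (arr : List Int) (i s : Int) : 0 ≤ bestSpec arr i s := by
  induction arr generalizing i s with
  | nil => simp [bestSpec]
  | cons p rest ih => simpa [bestSpec] using Or.inr (ih (i + 1) (s + p))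

-- invariant: A's audience = true prefix sum + counter; its final counter is max c (bestSpec of the rest)
theorem opera_loop_inv (arr : List Int) (i c s : Int) (hc : 0 ≤ c) (h0 : i = 0 → c = 0 ∧ s = 0)
    (hi : 0 ≤ i) :
    (arr.foldl
      (fun (st : Int × Int × Int) persons =>
        let level := st.1; let counter := st.2.1; let audience := st.2.2
        if level = 0 then
          (level + 1, counter, audience + persons)
        else if audience ≥ level then
          (level + 1, counter, audience + persons)
        else
          (level + 1, counter + (level - audience), audience + persons + (level - audience)))
      (i, c, s + c)).2.1
    = max c (bestSpec arr i s) := by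
  induction arr generalizing i c s with
  | nil => simp [bestSpec]; omega
  | cons p rest ih =>
    simp only [List.foldl_cons, bestSpec]
    by_cases hz : i = 0
    · obtain ⟨hc0, hs0⟩ := h0 hz
      subst hz hc0 hs0
      have h1 := ih 1 0 p le_rfl (by omega) (by omega)
      norm_num at h1 ⊢
      rw [h1]
    · simp only [if_neg hz]
      by_cases hge : s + c ≥ i
      · simp only [if_pos hge]
        have := ih (i + 1) c (s + p) hc (by omega) (by omega)
        rw [show s + c + p = s + p + c by ring, this]
        have := bestSpec_nonneg rest (i + 1) (s + p)
        omega
      · simp only [if_neg hge]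
        have := ih (i + 1) (i - s) (s + p) (by omega) (by omega) (by omega)
        rw [show s + c + p + (i - (s + c)) = s + p + (i - s) by ring,
            show c + (i - (s + c)) = i - s by ring, this]
        omega

-- the prefix-sum list B's pass 1 builds
def prefList : List Int → Int → List Int
  | [], _ => []
  | p :: rest, s => s :: prefList rest (s + p)

theorem prefix_fold (arr : List Int) (s : Int) (acc : List Int) :
    (arr.foldl (fun (st : Int × List Int) p => (st.1 + p, st.2 ++ [st.1])) (s, acc)).2
    = acc ++ prefList arr s := by
  induction arr generalizing s acc with
  | nil => simp [prefList]
  | cons p rest ih =>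
    simp only [List.foldl_cons, prefList]
    rw [ih (s + p) (acc ++ [s])]
    simp

theorem enum_fold (arr : List Int) (k s best : Int) (hb : 0 ≤ best) :
    (PySem.List.enumerate (prefList arr s) k).foldl
      (fun best it => max best (it.1 - it.2)) best
    = max best (bestSpec arr k s) := by
  induction arr generalizing k s best with
  | nil => simp [prefList, bestSpec]; omega
  | cons p rest ih =>
    simp only [prefList, PySem.List.enumerate_cons, List.foldl_cons, bestSpec]
    rw [ih (k + 1) (s + p) (max best (k - s)) (by omega)]
    omega

-- ===== VERDICT (by name: the statement is the Claim_ definition above) =====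
theorem opera_spec : Claim_equal_opera := by
  intro length array index _
  show opera length array index = opera_alt length array index
  unfold opera opera_alt
  have hA := opera_loop_inv array 0 0 0 le_rfl (fun _ => ⟨rfl, rfl⟩) le_rfl
  norm_num at hA
  simp only [hA, prefix_fold array 0 [], List.nil_append,
    enum_fold array 0 0 0 le_rfl]
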